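-- pv_equiv track=rewrite | github.com/mtgordon/PyGem-Modifying-2023 | FeBio Inverse/PointsExtractionTesting.py | separate_xyz_coords
-- ===== SOURCE A (Python) =====
-- def separate_xyz_coords(point_dict):
--    # Initialize empty arrays to hold x, y, and z coordinates
--    x_values = []
--    y_values = []
--    z_values = []
--
--
--    # Loop through the dictionary items
--    for key, coords in point_dict.items():
--        # Ensure the coordinates have length 3
--        if len(coords) == 3:
--            x_values.append(coords[0])
--            y_values.append(coords[1])
--            z_values.append(coords[2])
--
--
--    return x_values, y_values, z_values
-- ===== SOURCE B (Python) =====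
-- def separate_xyz_coords(point_dict):
--     valid = [coords for coords in point_dict.values() if len(coords) == 3]
--     if not valid:
--         return [], [], []
--     x_values, y_values, z_values = (list(t) for t in zip(*valid))
--     return x_values, y_values, z_values
-- ===== Notes on version B (the rewrite author's own statement) =====
-- stated objective: idiomatic
-- what changed: Replaces the fused loop with three growing accumulators by a filter of valid triples followed by a zip(*...) transpose.
import Mathlib
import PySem

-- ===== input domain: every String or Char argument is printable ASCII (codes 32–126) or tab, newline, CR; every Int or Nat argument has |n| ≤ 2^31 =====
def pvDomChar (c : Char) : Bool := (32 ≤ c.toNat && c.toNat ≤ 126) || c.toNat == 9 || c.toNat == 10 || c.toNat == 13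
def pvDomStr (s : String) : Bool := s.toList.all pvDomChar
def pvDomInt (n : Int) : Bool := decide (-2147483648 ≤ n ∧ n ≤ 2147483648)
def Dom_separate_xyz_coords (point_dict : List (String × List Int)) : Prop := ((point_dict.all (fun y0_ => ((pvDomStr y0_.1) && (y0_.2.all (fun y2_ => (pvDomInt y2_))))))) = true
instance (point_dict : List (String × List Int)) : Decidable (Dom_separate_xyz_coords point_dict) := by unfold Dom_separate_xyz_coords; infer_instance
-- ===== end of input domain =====

-- B replaces A's fused three-accumulator loop by a filter of valid triples followed by a transpose (idiomatic decomposition).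

-- ===== PORT A =====
-- the loop over point_dict.items() with the three append-accumulators
def sepA_loop : List (String × List Int) → List Int × List Int × List Int → List Int × List Int × List Int
  | [], acc => acc
  | (_, coords) :: rest, (xs, ys, zs) =>
      if coords.length = 3 then
        -- coords[0], coords[1], coords[2]: nonnegative in-range indices, exact as getD
        sepA_loop rest (xs ++ [coords.getD 0 0], ys ++ [coords.getD 1 0], zs ++ [coords.getD 2 0])
      else
        sepA_loop rest (xs, ys, zs)

def separate_xyz_coords (point_dict : List (String × List Int)) : List Int × List Int × List Int :=
  sepA_loop point_dict ([], [], [])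

-- ===== PORT B =====
def separate_xyz_coords_alt (point_dict : List (String × List Int)) : List Int × List Int × List Int :=
  let valid := (point_dict.map Prod.snd).filter (fun c => c.length == 3)
  if valid.isEmpty then ([], [], [])
  else
    -- zip(*valid): the i-th component of every triple
    (valid.map (fun c => c.getD 0 0), valid.map (fun c => c.getD 1 0), valid.map (fun c => c.getD 2 0))

-- ===== PRECONDITION & SPEC =====
def Spec_separate_xyz_coords (point_dict : List (String × List Int)) (out : List Int × List Int × List Int) : Prop := out = separate_xyz_coords_alt point_dict
instance (point_dict : List (String × List Int)) (out : List Int × List Int × List Int) : Decidable (Spec_separate_xyz_coords point_dict out) := by unfold Spec_separate_xyz_coords; infer_instance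

-- ===== CLAIM (what is proved, stated in full; the proofs are below) =====
def Claim_equal_separate_xyz_coords : Prop := ∀ (point_dict : List (String × List Int)), Dom_separate_xyz_coords point_dict → Spec_separate_xyz_coords point_dict (separate_xyz_coords point_dict)

-- ===== LEMMAS AND PROOFS =====

-- A's loop appends to the accumulator exactly the three projections of the filtered triples.
theorem sepA_loop_eq (pd : List (String × List Int)) (xs ys zs : List Int) :
    sepA_loop pd (xs, ys, zs) =
      (xs ++ ((pd.map Prod.snd).filter (fun c => c.length == 3)).map (fun c => c.getD 0 0),
       ys ++ ((pd.map Prod.snd).filter (fun c => c.length == 3)).map (fun c => c.getD 1 0),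
       zs ++ ((pd.map Prod.snd).filter (fun c => c.length == 3)).map (fun c => c.getD 2 0)) := by
  induction pd generalizing xs ys zs with
  | nil => simp [sepA_loop]
  | cons h t ih =>
      obtain ⟨k, c⟩ := h
      by_cases hc : c.length = 3 <;> simp [sepA_loop, hc, ih]

theorem separate_xyz_coords_spec : Claim_equal_separate_xyz_coords := by
  intro pd _
  unfold Spec_separate_xyz_coords separate_xyz_coords separate_xyz_coords_alt
  rw [sepA_loop_eq]
  by_cases h : ((pd.map Prod.snd).filter (fun c => c.length == 3)).isEmpty <;>
    simp_all [List.isEmpty_iff]
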